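-- pv_equiv track=rewrite | github.com/antoniorv6/SMT-plusplus | Generator/SynthGenerator.py | filter_system_continuation
-- ===== SOURCE A (Python) =====
-- def filter_system_continuation(system, cut_end=True):
--     if cut_end:
--         system = system[:-5]
--
--     system = " ".join(system).split(" <b> ")
--     ignored_indices = []
--     for idx, line in enumerate(system):
--         if any(token in line for token in ['*clef', '*k', '*M', '*met']):
--             ignored_indices.append(idx)
--         if "=" in line:
--             break
--     system = [line for idx, line in enumerate(system) if idx not in ignored_indices]
--
--     system = " <b> ".join(system).split(' ')
--     return [token for token in system if token != '']
-- ===== SOURCE B (Python) =====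
-- def filter_system_continuation(system, cut_end=True):
--     if cut_end:
--         system = system[:-5]
--
--     lines = " ".join(system).split(" <b> ")
--     kept = []
--     passed_equals = False
--     for line in lines:
--         if passed_equals:
--             kept.append(line)
--         else:
--             if not any(token in line for token in ['*clef', '*k', '*M', '*met']):
--                 kept.append(line)
--             if "=" in line:
--                 passed_equals = True
--
--     return [token for token in " <b> ".join(kept).split(' ') if token != '']
-- ===== Notes on version B (the rewrite author's own statement) =====
-- stated objective: simpler
-- what changed: Replaces the two-phase scheme (collect ignored indices with enumerate, then filter the enumerated list by index membership) with a single pass over the lines keeping a boolean 'passed_equals' flag, so the intermediate index list and the quadratic 'idx not in ignored_indices' membership test disappear.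
import Mathlib
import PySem

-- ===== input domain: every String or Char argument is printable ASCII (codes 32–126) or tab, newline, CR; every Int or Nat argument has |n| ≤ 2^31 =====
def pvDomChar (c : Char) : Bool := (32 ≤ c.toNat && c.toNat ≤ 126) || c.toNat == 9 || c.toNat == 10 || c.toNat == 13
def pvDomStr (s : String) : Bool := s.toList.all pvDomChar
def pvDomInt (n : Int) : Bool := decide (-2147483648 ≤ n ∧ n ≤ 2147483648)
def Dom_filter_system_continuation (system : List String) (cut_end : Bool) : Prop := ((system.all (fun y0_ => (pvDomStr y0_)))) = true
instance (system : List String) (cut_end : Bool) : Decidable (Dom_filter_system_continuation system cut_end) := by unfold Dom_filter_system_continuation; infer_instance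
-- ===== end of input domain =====

-- B replaces A's two-phase "collect ignored indices, then filter by index membership"
-- with one pass over the lines carrying a boolean 'passed_equals' flag (objective: simpler).

-- s.split(sep) for a non-empty separator (used by both Pythons verbatim)
def pvSplitStr (s sep : String) : List String :=
  (PySem.Chars.splitOn s.toList sep.toList).map String.ofList

-- ===== PORT A =====
def pvTokensA : List String := ["*clef", "*k", "*M", "*met"]

-- A's for-loop with break, collecting ignored indices
def pvLoopA : List (Int × String) → List Int → List Int
  | [], acc => acc
  | (idx, line) :: rest, acc =>
      let acc' := if pvTokensA.any (fun t => PySem.Str.isIn t line) then acc ++ [idx] else acc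
      if PySem.Str.isIn "=" line then acc' else pvLoopA rest acc'

def filter_system_continuation (system : List String) (cut_end : Bool) : List String :=
  let system := if cut_end then PySem.List.slice system none (some (-5)) else system
  let system := pvSplitStr (PySem.Str.join " " system) " <b> "
  let ignored := pvLoopA (PySem.List.enumerate system 0) []
  let system := (PySem.List.enumerate system 0).filterMap
      (fun p => if p.1 ∈ ignored then none else some p.2)
  let system := pvSplitStr (PySem.Str.join " <b> " system) " "
  system.filter (fun t => t ≠ "")

-- ===== PORT B =====
def pvTokensB : List String := ["*clef", "*k", "*M", "*met"]

-- one step of B's single pass: state is (kept lines so far, passed_equals flag)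
def pvStepB (st : List String × Bool) (line : String) : List String × Bool :=
  if st.2 then (st.1 ++ [line], st.2)
  else
    let kept := if pvTokensB.any (fun t => PySem.Str.isIn t line) then st.1 else st.1 ++ [line]
    (kept, if PySem.Str.isIn "=" line then true else st.2)

def filter_system_continuation_alt (system : List String) (cut_end : Bool) : List String :=
  let system := if cut_end then PySem.List.slice system none (some (-5)) else system
  let lines := pvSplitStr (PySem.Str.join " " system) " <b> "
  let kept := (lines.foldl pvStepB ([], false)).1
  (pvSplitStr (PySem.Str.join " <b> " kept) " ").filter (fun t => t ≠ "")

-- ===== PRECONDITION & SPEC =====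
def Spec_filter_system_continuation (system : List String) (cut_end : Bool) (out : List String) : Prop := out = filter_system_continuation_alt system cut_end
instance (system : List String) (cut_end : Bool) (out : List String) : Decidable (Spec_filter_system_continuation system cut_end out) := by unfold Spec_filter_system_continuation; infer_instance

-- ===== CLAIM (what is proved, stated in full; the proofs are below) =====
def Claim_equal_filter_system_continuation : Prop := ∀ (system : List String) (cut_end : Bool), Dom_filter_system_continuation system cut_end → Spec_filter_system_continuation system cut_end (filter_system_continuation system cut_end)

-- ===== LEMMAS AND PROOFS =====

-- common reference computation: the list of lines both middle phases keep
def pvKeepRec : List String → List String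
  | [] => []
  | l :: rest =>
      (if pvTokensA.any (fun t => PySem.Str.isIn t l) then [] else [l]) ++
      (if PySem.Str.isIn "=" l then rest else pvKeepRec rest)

theorem pvStepB_false (acc : List String) (l : String) :
    pvStepB (acc, false) l =
      ((if (pvTokensA.any fun t => PySem.Str.isIn t l) = true then acc else acc ++ [l]),
       (if PySem.Str.isIn "=" l = true then true else false)) := rfl

theorem pvStepB_true1 (acc : List String) (l : String) :
    pvStepB (acc, true) l = (acc ++ [l], true) := rfl

theorem pvFoldB_true (lines : List String) (acc : List String) :
    lines.foldl pvStepB (acc, true) = (acc ++ lines, true) := by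
  induction lines generalizing acc with
  | nil => simp
  | cons l rest ih => rw [List.foldl_cons, pvStepB_true1, ih]; simp

theorem pvFoldB_eq_keepRec (lines : List String) (acc : List String) :
    (lines.foldl pvStepB (acc, false)).1 = acc ++ pvKeepRec lines := by
  induction lines generalizing acc with
  | nil => simp [pvKeepRec]
  | cons l rest ih =>
    rw [List.foldl_cons, pvStepB_false]
    simp only [pvKeepRec]
    by_cases hT : (pvTokensA.any fun t => PySem.Str.isIn t l) = true <;>
      by_cases hE : PySem.Str.isIn "=" l = true
    · rw [if_pos hT, if_pos hT, if_pos hE, if_pos hE, pvFoldB_true]; simp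
    · rw [if_pos hT, if_pos hT, if_neg hE, if_neg hE, ih]; simp
    · rw [if_neg hT, if_neg hT, if_pos hE, if_pos hE, pvFoldB_true]; simp
    · rw [if_neg hT, if_neg hT, if_neg hE, if_neg hE, ih]; simp

theorem pvLoopA_cons (idx : Int) (line : String) (rest : List (Int × String)) (acc : List Int) :
    pvLoopA ((idx, line) :: rest) acc =
      if PySem.Str.isIn "=" line = true then
        (if (pvTokensA.any fun t => PySem.Str.isIn t line) = true then acc ++ [idx] else acc)
      else
        pvLoopA rest
          (if (pvTokensA.any fun t => PySem.Str.isIn t line) = true then acc ++ [idx] else acc) := rfl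

theorem pvLoopA_acc (l : List (Int × String)) (acc : List Int) :
    pvLoopA l acc = acc ++ pvLoopA l [] := by
  induction l generalizing acc with
  | nil => simp [pvLoopA]
  | cons p rest ih =>
    obtain ⟨idx, line⟩ := p
    rw [pvLoopA_cons, pvLoopA_cons]
    by_cases hT : (pvTokensA.any fun t => PySem.Str.isIn t line) = true <;>
      by_cases hE : PySem.Str.isIn "=" line = true
    · rw [if_pos hT, if_pos hT, if_pos hE, if_pos hE]; simp
    · rw [if_pos hT, if_pos hT, if_neg hE, if_neg hE, ih (acc ++ [idx]), ih ([] ++ [idx])]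
      simp
    · rw [if_neg hT, if_neg hT, if_pos hE, if_pos hE]; simp
    · rw [if_neg hT, if_neg hT, if_neg hE, if_neg hE]; exact ih acc

theorem pvLoopA_lb (ls : List String) (n : Int) (i : Int)
    (h : i ∈ pvLoopA (PySem.List.enumerate ls n) []) : n ≤ i := by
  induction ls generalizing n with
  | nil => simp [PySem.List.enumerate_nil, pvLoopA] at h
  | cons l rest ih =>
    rw [PySem.List.enumerate_cons, pvLoopA_cons] at h
    by_cases hT : (pvTokensA.any fun t => PySem.Str.isIn t l) = true <;>
      by_cases hE : PySem.Str.isIn "=" l = true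
    · rw [if_pos hT, if_pos hE] at h; simp at h; omega
    · rw [if_pos hT, if_neg hE, pvLoopA_acc] at h
      simp at h
      rcases h with h | h
      · omega
      · have := ih (n + 1) h; omega
    · rw [if_neg hT, if_pos hE] at h; simp at h
    · rw [if_neg hT, if_neg hE] at h
      have := ih (n + 1) h; omega

theorem pvFilterA_eq_keepRec (ls : List String) (n : Int) :
    (PySem.List.enumerate ls n).filterMap
        (fun p => if p.1 ∈ pvLoopA (PySem.List.enumerate ls n) [] then none else some p.2)
      = pvKeepRec ls := by
  induction ls generalizing n with
  | nil => simp [PySem.List.enumerate_nil, pvKeepRec]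
  | cons l rest ih =>
    rw [PySem.List.enumerate_cons]
    have hmem : ∀ p ∈ PySem.List.enumerate rest (n + 1), n + 1 ≤ p.1 := by
      intro p hp
      rw [PySem.List.mem_enumerate_iff] at hp
      obtain ⟨k, hk, rfl⟩ := hp
      omega
    have hsnd : (PySem.List.enumerate rest (n + 1)).filterMap
        (fun p => some p.2) = rest := by
      rw [show (fun (p : Int × String) => some p.2) = some ∘ (fun (p : Int × String) => p.2) from rfl,
        List.filterMap_eq_map, PySem.List.map_snd_enumerate]
    have hI'mem : ∀ i ∈ pvLoopA (PySem.List.enumerate rest (n + 1)) [], n + 1 ≤ i :=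
      fun i hi => pvLoopA_lb rest (n + 1) i hi
    by_cases hT : (pvTokensA.any fun t => PySem.Str.isIn t l) = true <;>
      by_cases hE : PySem.Str.isIn "=" l = true
    -- dropped line, break: ignored = [n], everything after is kept
    · have hIGN : pvLoopA ((n, l) :: PySem.List.enumerate rest (n + 1)) [] = [] ++ [n] := by
        rw [pvLoopA_cons, if_pos hE, if_pos hT]
      simp only [pvKeepRec, hIGN]
      rw [if_pos hT, if_pos hE]
      rw [List.filterMap_cons_none (by simp)]
      rw [List.filterMap_congr (g := fun p => some p.2) ?_, hsnd]
      · simp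
      · intro p hp
        have h1 := hmem p hp
        have h2 : ¬ p.1 = n := by omega
        simp [h2]
    -- dropped line, no break: ignored = [n] ++ ignored-of-rest
    · have hIGN : pvLoopA ((n, l) :: PySem.List.enumerate rest (n + 1)) [] =
          ([] ++ [n]) ++ pvLoopA (PySem.List.enumerate rest (n + 1)) [] := by
        rw [pvLoopA_cons, if_neg hE, if_pos hT, pvLoopA_acc]
      simp only [pvKeepRec, hIGN]
      rw [if_pos hT, if_neg hE]
      rw [List.filterMap_cons_none (by simp)]
      rw [List.filterMap_congr
          (g := fun p => if p.1 ∈ pvLoopA (PySem.List.enumerate rest (n + 1)) [] then none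
                         else some p.2) ?_, ih (n + 1)]
      · simp
      · intro p hp
        have h1 := hmem p hp
        have h2 : ¬ p.1 = n := by omega
        simp [h2]
    -- kept line, break: ignored = []
    · have hIGN : pvLoopA ((n, l) :: PySem.List.enumerate rest (n + 1)) [] = ([] : List Int) := by
        rw [pvLoopA_cons, if_pos hE, if_neg hT]
      simp only [pvKeepRec, hIGN]
      rw [if_neg hT, if_pos hE]
      rw [List.filterMap_cons_some (b := l) (by simp)]
      rw [List.filterMap_congr (g := fun p => some p.2) (fun p _ => by simp), hsnd]
      simp
    -- kept line, no break: ignored = ignored-of-rest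
    · have hIGN : pvLoopA ((n, l) :: PySem.List.enumerate rest (n + 1)) [] =
          pvLoopA (PySem.List.enumerate rest (n + 1)) [] := by
        rw [pvLoopA_cons, if_neg hE, if_neg hT]
      have hn : (n : Int) ∉ pvLoopA (PySem.List.enumerate rest (n + 1)) [] :=
        fun hmem' => by have := hI'mem n hmem'; omega
      simp only [pvKeepRec, hIGN]
      rw [if_neg hT, if_neg hE]
      rw [List.filterMap_cons_some (b := l) (by simp [hn])]
      rw [ih (n + 1)]
      simp

-- ===== VERDICT (by name: the statement is the Claim_ definition above) =====
theorem filter_system_continuation_spec : Claim_equal_filter_system_continuation := by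
  intro system cut_end _
  unfold Spec_filter_system_continuation filter_system_continuation filter_system_continuation_alt
  simp only [pvFilterA_eq_keepRec, pvFoldB_eq_keepRec, List.nil_append]
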